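-- pv_equiv track=rewrite | github.com/liquidmetal/algorithms | python/problems/mobile-robot/solution.py | executeCommands
-- ===== SOURCE A (Python) =====
-- def go(posX, posY, orientation):
--     if orientation == 0:
--         posY -= 1
--     elif orientation == 1:
--         posX += 1
--     elif orientation == 2:
--         posY += 1
--     elif orientation == 3:
--         posX -= 1
--     else:
--         raise Exception("Unkonwn orientation")
--
--     return (posX, posY)
--
-- def executeCommands(commands, times):
--     posX = 0
--     posY = 0
--     orientation = 0
--     for i in range(times):
--         for c in commands:
--             if c == 'G':
--                 (posX, posY) = go(posX, posY, orientation)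
--             elif c == 'L':
--                 orientation -= 1
--                 if orientation < 0:
--                     orientation += 4
--             elif c == 'R':
--                 orientation += 1
--                 if orientation > 3:
--                     orientation -= 4
--
--     return (posX, posY, orientation)
-- ===== SOURCE B (Python) =====
-- def executeCommands(commands, times):
--     # One pass over commands gives the per-iteration displacement (x, y) and net
--     # rotation o; the repeated iterations are composed in closed form using the
--     # period (1, 2 or 4) of a quarter-turn rotation, so cost is O(len(commands)).
--     x = 0
--     y = 0
--     o = 0
--     for c in commands:
--         if c == 'G':
--             if o == 0:
--                 y -= 1
--             elif o == 1:
--                 x += 1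
--             elif o == 2:
--                 y += 1
--             else:
--                 x -= 1
--         elif c == 'L':
--             o = (o - 1) % 4
--         elif c == 'R':
--             o = (o + 1) % 4
--     n = max(times, 0)
--     if o == 0:
--         tx = n * x
--         ty = n * y
--     elif o == 2:
--         if n % 2 == 1:
--             tx = x
--             ty = y
--         else:
--             tx = 0
--             ty = 0
--     else:
--         tx = 0
--         ty = 0
--         px = x
--         py = y
--         for k in range(n % 4):
--             tx += px
--             ty += py
--             for _ in range(o):
--                 px, py = -py, px
--     return (tx, ty, (o * n) % 4)
-- ===== Notes on version B (the rewrite author's own statement) =====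
-- stated objective: faster
-- what changed: A simulates every command of every one of the `times` repetitions; B scans the command string once to get the per-repetition displacement and net rotation, then composes the repetitions in closed form using the period (1, 2 or 4) of the quarter-turn rotation, so the repetition count never enters a loop of more than 3 steps.
import Mathlib
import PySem

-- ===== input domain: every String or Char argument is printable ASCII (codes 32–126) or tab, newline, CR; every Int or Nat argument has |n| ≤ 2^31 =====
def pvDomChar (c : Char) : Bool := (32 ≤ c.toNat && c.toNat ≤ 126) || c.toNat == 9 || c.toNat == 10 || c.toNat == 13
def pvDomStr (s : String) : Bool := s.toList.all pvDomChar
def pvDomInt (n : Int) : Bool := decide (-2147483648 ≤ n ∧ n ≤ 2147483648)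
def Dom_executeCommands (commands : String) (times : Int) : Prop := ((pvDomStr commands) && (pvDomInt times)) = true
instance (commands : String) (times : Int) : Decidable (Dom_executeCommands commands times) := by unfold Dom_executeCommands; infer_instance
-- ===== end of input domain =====

-- B replaces A's `times × len(commands)` simulation by a single pass over the
-- command string plus a closed-form composition of the repetitions (objective: faster).

-- ===== PORT A =====
-- Python `go`; the final `else` is a `raise`, unreachable from `executeCommands`
-- (orientation always stays in 0..3), ported as the identity position.
def goA (posX posY orientation : Int) : Int × Int :=
  if orientation = 0 then (posX, posY - 1)
  else if orientation = 1 then (posX + 1, posY)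
  else if orientation = 2 then (posX, posY + 1)
  else if orientation = 3 then (posX - 1, posY)
  else (posX, posY)

-- one step of A's inner `for c in commands` loop; state (posX, posY, orientation)
def stepA (s : Int × Int × Int) (c : Char) : Int × Int × Int :=
  if c = 'G' then
    ((goA s.1 s.2.1 s.2.2).1, (goA s.1 s.2.1 s.2.2).2, s.2.2)
  else if c = 'L' then
    (s.1, s.2.1, if s.2.2 - 1 < 0 then s.2.2 - 1 + 4 else s.2.2 - 1)
  else if c = 'R' then
    (s.1, s.2.1, if s.2.2 + 1 > 3 then s.2.2 + 1 - 4 else s.2.2 + 1)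
  else s

def executeCommands (commands : String) (times : Int) : List Int :=
  let fin := (PySem.List.pyRange 0 times 1).foldl
    (fun s _ => commands.toList.foldl stepA s) (0, 0, 0)
  [fin.1, fin.2.1, fin.2.2]

-- ===== PORT B =====
-- one step of Source B's single pass over `commands`
def stepB (s : Int × Int × Int) (c : Char) : Int × Int × Int :=
  if c = 'G' then
    (if s.2.2 = 0 then (s.1, s.2.1 - 1, s.2.2)
     else if s.2.2 = 1 then (s.1 + 1, s.2.1, s.2.2)
     else if s.2.2 = 2 then (s.1, s.2.1 + 1, s.2.2)
     else (s.1 - 1, s.2.1, s.2.2))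
  else if c = 'L' then (s.1, s.2.1, PySem.Int.mod (s.2.2 - 1) 4)
  else if c = 'R' then (s.1, s.2.1, PySem.Int.mod (s.2.2 + 1) 4)
  else s

def executeCommands_alt (commands : String) (times : Int) : List Int :=
  let st := commands.toList.foldl stepB (0, 0, 0)
  let x := st.1
  let y := st.2.1
  let o := st.2.2
  let n := max times 0
  let t : Int × Int :=
    if o = 0 then (n * x, n * y)
    else if o = 2 then (if PySem.Int.mod n 2 = 1 then (x, y) else (0, 0))
    else
      -- Source B's loop over range(n % 4), state ((tx, ty), (px, py));
      -- the inner `for _ in range(o)` quarter-turn loop is the inner foldl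
      let r := (PySem.List.pyRange 0 (PySem.Int.mod n 4) 1).foldl
        (fun (s : (Int × Int) × Int × Int) _ =>
          ((s.1.1 + s.2.1, s.1.2 + s.2.2),
           (PySem.List.pyRange 0 o 1).foldl (fun (p : Int × Int) _ => (-p.2, p.1)) s.2))
        ((0, 0), (x, y))
      r.1
  [t.1, t.2, PySem.Int.mod (o * n) 4]

-- ===== PRECONDITION & SPEC =====
def Spec_executeCommands (commands : String) (times : Int) (out : List Int) : Prop := out = executeCommands_alt commands times
instance (commands : String) (times : Int) (out : List Int) : Decidable (Spec_executeCommands commands times out) := by unfold Spec_executeCommands; infer_instance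

-- ===== CLAIM (what is proved, stated in full; the proofs are below) =====
def Claim_equal_executeCommands : Prop := ∀ (commands : String) (times : Int), Dom_executeCommands commands times → Spec_executeCommands commands times (executeCommands commands times)

-- ===== LEMMAS AND PROOFS =====

-- rotation of a displacement by k quarter turns (depends only on k % 4)
def rotK (k : Int) (p : Int × Int) : Int × Int :=
  if k % 4 = 0 then p
  else if k % 4 = 1 then (-p.2, p.1)
  else if k % 4 = 2 then (-p.1, -p.2)
  else (p.2, -p.1)

-- acting with the one-pass summary t = (dx, dy, r) on a state s
def act (s t : Int × Int × Int) : Int × Int × Int :=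
  (s.1 + (rotK s.2.2 (t.1, t.2.1)).1,
   s.2.1 + (rotK s.2.2 (t.1, t.2.1)).2,
   (s.2.2 + t.2.2) % 4)

-- partial sums of the rotated per-pass displacement
def sumS (d : Int × Int) (r : Int) : Nat → Int × Int
  | 0 => (0, 0)
  | n + 1 => ((sumS d r n).1 + (rotK ((n : Int) * r) d).1,
              (sumS d r n).2 + (rotK ((n : Int) * r) d).2)

lemma rotK_congr {a b : Int} (d : Int × Int) (h : a % 4 = b % 4) : rotK a d = rotK b d := by
  unfold rotK; rw [h]

lemma stepA_o_bound (s : Int × Int × Int) (c : Char) (h : 0 ≤ s.2.2 ∧ s.2.2 < 4) :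
    0 ≤ (stepA s c).2.2 ∧ (stepA s c).2.2 < 4 := by
  obtain ⟨x, y, o⟩ := s
  simp only [stepA]
  split_ifs <;> simp_all <;> omega

lemma foldl_stepA_o_bound (cs : List Char) : ∀ s : Int × Int × Int,
    0 ≤ s.2.2 ∧ s.2.2 < 4 → 0 ≤ (cs.foldl stepA s).2.2 ∧ (cs.foldl stepA s).2.2 < 4 := by
  induction cs with
  | nil => intro s h; simpa using h
  | cons c cs ih => intro s h; exact ih _ (stepA_o_bound s c h)

lemma stepB_eq_stepA (s : Int × Int × Int) (c : Char) (h : 0 ≤ s.2.2 ∧ s.2.2 < 4) :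
    stepB s c = stepA s c := by
  obtain ⟨x, y, o⟩ := s
  obtain ⟨h1, h2⟩ := h
  simp only at h1 h2
  interval_cases o <;>
    simp [stepA, stepB, goA, PySem.Int.mod] <;> split_ifs <;> simp_all <;> omega

lemma foldl_stepB_eq (cs : List Char) : ∀ s : Int × Int × Int,
    0 ≤ s.2.2 ∧ s.2.2 < 4 → cs.foldl stepB s = cs.foldl stepA s := by
  induction cs with
  | nil => intro s _; rfl
  | cons c cs ih =>
    intro s h
    simp only [List.foldl_cons, stepB_eq_stepA s c h]
    exact ih _ (stepA_o_bound s c h)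

lemma stepA_act (s t : Int × Int × Int) (c : Char)
    (hs : 0 ≤ s.2.2 ∧ s.2.2 < 4) (ht : 0 ≤ t.2.2 ∧ t.2.2 < 4) :
    stepA (act s t) c = act s (stepA t c) := by
  obtain ⟨x, y, o⟩ := s
  obtain ⟨dx, dy, r⟩ := t
  obtain ⟨h1, h2⟩ := hs
  obtain ⟨h3, h4⟩ := ht
  simp only at h1 h2 h3 h4
  interval_cases o <;> interval_cases r <;>
    (simp [stepA, goA, act, rotK]; split_ifs <;>
      first
        | rfl
        | omega
        | (constructor <;> ring)
        | ring
        | simp_all)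

lemma foldl_stepA_act (cs : List Char) (s : Int × Int × Int)
    (hs : 0 ≤ s.2.2 ∧ s.2.2 < 4) :
    cs.foldl stepA s = act s (cs.foldl stepA (0, 0, 0)) := by
  induction cs using List.reverseRecOn with
  | nil =>
    obtain ⟨x, y, o⟩ := s
    obtain ⟨h1, h2⟩ := hs
    simp only at h1 h2
    simp only [List.foldl_nil, act, rotK]
    split_ifs <;> simp <;> omega
  | append_singleton cs c ih =>
    rw [List.foldl_append, List.foldl_append, ih, List.foldl_cons, List.foldl_nil,
      stepA_act s _ c hs (foldl_stepA_o_bound cs (0,0,0) (by simp))]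
    rfl

lemma foldl_const_iterate {α : Type} (f : α → α) (l : List Int) : ∀ s : α,
    l.foldl (fun s _ => f s) s = f^[l.length] s := by
  induction l with
  | nil => intro s; rfl
  | cons a l ih => intro s; simp [List.foldl_cons, ih, Function.iterate_succ_apply]

lemma iterate_passA (cs : List Char) (T : Int × Int × Int)
    (hT : cs.foldl stepA (0, 0, 0) = T) (n : Nat) :
    (fun s => cs.foldl stepA s)^[n] (0, 0, 0) =
      ((sumS (T.1, T.2.1) T.2.2 n).1, (sumS (T.1, T.2.1) T.2.2 n).2, ((n : Int) * T.2.2) % 4) := by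
  induction n with
  | zero => simp [sumS]
  | succ n ih =>
    rw [Function.iterate_succ_apply', ih]
    have hb : 0 ≤ ((n : Int) * T.2.2) % 4 ∧ ((n : Int) * T.2.2) % 4 < 4 :=
      ⟨Int.emod_nonneg _ (by norm_num), Int.emod_lt_of_pos _ (by norm_num)⟩
    rw [foldl_stepA_act cs _ (by exact ⟨hb.1, hb.2⟩), hT]
    obtain ⟨dx, dy, r⟩ := T
    simp only [act, sumS, Prod.mk.injEq]
    refine ⟨?_, ?_, ?_⟩
    · rw [rotK_congr _ (by omega : ((n : Int) * r) % 4 % 4 = ((n : Int) * r) % 4)]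
    · rw [rotK_congr _ (by omega : ((n : Int) * r) % 4 % 4 = ((n : Int) * r) % 4)]
    · push_cast
      rw [show ((n : Int) + 1) * r = (n : Int) * r + r from by ring]
      omega

lemma sumS_r0 (d : Int × Int) (n : Nat) : sumS d 0 n = ((n : Int) * d.1, (n : Int) * d.2) := by
  induction n with
  | zero => simp [sumS]
  | succ n ih => simp [sumS, ih, rotK]; push_cast; constructor <;> ring

lemma sumS_r2_step (d : Int × Int) (n : Nat) : sumS d 2 (n + 2) = sumS d 2 n := by
  have h1 : sumS d 2 (n + 2) = ((sumS d 2 n).1 + (rotK ((n : Int) * 2) d).1 + (rotK (((n : Int) + 1) * 2) d).1,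
      (sumS d 2 n).2 + (rotK ((n : Int) * 2) d).2 + (rotK (((n : Int) + 1) * 2) d).2) := by
    simp [sumS]
  rw [h1]
  rcases Nat.even_or_odd n with ⟨m, hm⟩ | ⟨m, hm⟩
  · rw [rotK_congr d (by omega : ((n : Int) * 2) % 4 = (0 : Int) % 4),
      rotK_congr d (by omega : (((n : Int) + 1) * 2) % 4 = (2 : Int) % 4)]
    simp [rotK]
  · rw [rotK_congr d (by omega : ((n : Int) * 2) % 4 = (2 : Int) % 4),
      rotK_congr d (by omega : (((n : Int) + 1) * 2) % 4 = (0 : Int) % 4)]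
    simp [rotK]

lemma sumS_r2_mod (d : Int × Int) (n : Nat) : sumS d 2 n = sumS d 2 (n % 2) := by
  induction n using Nat.strong_induction_on with
  | _ n ih =>
    match n with
    | 0 => rfl
    | 1 => rfl
    | n + 2 => rw [sumS_r2_step, ih n (by omega)]; congr 1; omega

lemma sumS_r13_step (d : Int × Int) (r : Int) (hr : r = 1 ∨ r = 3) (n : Nat) :
    sumS d r (n + 4) = sumS d r n := by
  have h1 : sumS d r (n + 4) = ((sumS d r n).1 + (rotK ((n : Int) * r) d).1
      + (rotK (((n : Int) + 1) * r) d).1 + (rotK (((n : Int) + 2) * r) d).1 + (rotK (((n : Int) + 3) * r) d).1,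
      (sumS d r n).2 + (rotK ((n : Int) * r) d).2
      + (rotK (((n : Int) + 1) * r) d).2 + (rotK (((n : Int) + 2) * r) d).2 + (rotK (((n : Int) + 3) * r) d).2) := by
    simp [sumS]
  rw [h1]
  have hm0 : 0 ≤ ((n : Int) * r) % 4 := Int.emod_nonneg _ (by norm_num)
  have hm4 : ((n : Int) * r) % 4 < 4 := Int.emod_lt_of_pos _ (by norm_num)
  rcases hr with rfl | rfl
  · obtain ⟨m, hm0', hm4', hmdef⟩ : ∃ m : Int, 0 ≤ m ∧ m < 4 ∧ ((n : Int) * 1) % 4 = m :=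
      ⟨_, hm0, hm4, rfl⟩
    rw [rotK_congr d (show ((n : Int) * 1) % 4 = m % 4 by omega),
      rotK_congr d (show (((n : Int) + 1) * 1) % 4 = (m + 1) % 4 by omega),
      rotK_congr d (show (((n : Int) + 2) * 1) % 4 = (m + 2) % 4 by omega),
      rotK_congr d (show (((n : Int) + 3) * 1) % 4 = (m + 3) % 4 by omega)]
    interval_cases m <;> (simp [rotK, Prod.ext_iff]; constructor <;> ring)
  · obtain ⟨m, hm0', hm4', hmdef⟩ : ∃ m : Int, 0 ≤ m ∧ m < 4 ∧ ((n : Int) * 3) % 4 = m :=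
      ⟨_, hm0, hm4, rfl⟩
    rw [rotK_congr d (show ((n : Int) * 3) % 4 = m % 4 by omega),
      rotK_congr d (show (((n : Int) + 1) * 3) % 4 = (m + 3) % 4 by omega),
      rotK_congr d (show (((n : Int) + 2) * 3) % 4 = (m + 6) % 4 by omega),
      rotK_congr d (show (((n : Int) + 3) * 3) % 4 = (m + 9) % 4 by omega)]
    interval_cases m <;> (simp [rotK, Prod.ext_iff]; constructor <;> ring)

lemma sumS_r13_mod (d : Int × Int) (r : Int) (hr : r = 1 ∨ r = 3) (n : Nat) :
    sumS d r n = sumS d r (n % 4) := by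
  induction n using Nat.strong_induction_on with
  | _ n ih =>
    match n with
    | 0 => rfl
    | 1 => rfl
    | 2 => rfl
    | 3 => rfl
    | n + 4 => rw [sumS_r13_step d r hr, ih n (by omega)]; congr 1; omega

-- ===== VERDICT (by name: the statement is the Claim_ definition above) =====
theorem executeCommands_spec : Claim_equal_executeCommands := by
  intro commands times _
  unfold Spec_executeCommands executeCommands executeCommands_alt
  rw [foldl_stepB_eq commands.toList (0, 0, 0) (by simp)]
  rw [foldl_const_iterate (fun s => commands.toList.foldl stepA s),
    PySem.List.length_pyRange_one,
    iterate_passA commands.toList _ rfl]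
  have hTb := foldl_stepA_o_bound commands.toList (0, 0, 0) (by simp)
  set N : Nat := (times - 0).toNat with hN
  have hmax : max times 0 = (N : Int) := by omega
  generalize hT : commands.toList.foldl stepA (0, 0, 0) = T at hTb ⊢
  obtain ⟨dx, dy, r⟩ := T
  obtain ⟨hr0, hr4⟩ := hTb
  simp only at hr0 hr4 ⊢
  rw [hmax]
  interval_cases r
  · -- r = 0
    simp [sumS_r0, PySem.Int.mod]
  · -- r = 1
    rw [sumS_r13_mod _ _ (Or.inl rfl)]
    have hmodN : PySem.Int.mod ((N : Int)) 4 = ((N % 4 : Nat) : Int) := by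
      exact_mod_cast PySem.Int.mod_natCast N 4
    have hmod3 : PySem.Int.mod (1 * (N : Int)) 4 = ((N : Int) * 1) % 4 := by
      rw [PySem.Int.mod_eq_emod_of_pos (by norm_num)]; ring_nf
    have htN : (((N : Int)) % 4).toNat = N % 4 := by omega
    have h4 : N % 4 = 0 ∨ N % 4 = 1 ∨ N % 4 = 2 ∨ N % 4 = 3 := by omega
    rcases h4 with h | h | h | h <;>
      (norm_num [hmodN, hmod3, htN, h, sumS, rotK, PySem.List.pyRange_one, List.range_succ,
         (show ((1 : Int)).toNat = 1 from rfl), (show ((3 : Int)).toNat = 3 from rfl)]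
       all_goals omega)
  · -- r = 2
    rw [sumS_r2_mod]
    have hmod2 : PySem.Int.mod ((N : Int)) 2 = ((N % 2 : Nat) : Int) := by
      exact_mod_cast PySem.Int.mod_natCast N 2
    have hmod4 : PySem.Int.mod (2 * (N : Int)) 4 = ((N : Int) * 2) % 4 := by
      rw [PySem.Int.mod_eq_emod_of_pos (by norm_num)]; ring_nf
    have h2 : N % 2 = 0 ∨ N % 2 = 1 := by omega
    rcases h2 with h | h
    · have hc : ((N : Int)) % 2 ≠ 1 := by omega
      norm_num [hmod2, hmod4, h, hc, sumS, rotK]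
      all_goals omega
    · have hc : ((N : Int)) % 2 = 1 := by omega
      norm_num [hmod2, hmod4, h, hc, sumS, rotK]
      all_goals omega
  · -- r = 3
    rw [sumS_r13_mod _ _ (Or.inr rfl)]
    have hmodN : PySem.Int.mod ((N : Int)) 4 = ((N % 4 : Nat) : Int) := by
      exact_mod_cast PySem.Int.mod_natCast N 4
    have hmod3 : PySem.Int.mod (3 * (N : Int)) 4 = ((N : Int) * 3) % 4 := by
      rw [PySem.Int.mod_eq_emod_of_pos (by norm_num)]; ring_nf
    have htN : (((N : Int)) % 4).toNat = N % 4 := by omega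
    have h4 : N % 4 = 0 ∨ N % 4 = 1 ∨ N % 4 = 2 ∨ N % 4 = 3 := by omega
    rcases h4 with h | h | h | h <;>
      (norm_num [hmodN, hmod3, htN, h, sumS, rotK, PySem.List.pyRange_one, List.range_succ,
         (show ((1 : Int)).toNat = 1 from rfl), (show ((3 : Int)).toNat = 3 from rfl)]
       all_goals omega)
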